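-- pv_equiv track=rewrite | github.com/rjnagel64/SVD-Project | main.py | extract_proteins
-- ===== SOURCE A (Python) =====
-- def extract_proteins(sequence):
--     """Extract the protein sequences from a translated sequence.
--
--     arguments:
--     - sequence: A translated amino acid sequence
--
--     returns:
--     An iterator for each protein sequence in the translated sequence.
--     """
--     index = 0
--     while index != -1 and index < len(sequence):
--         start_index = sequence.find("M", index)
--         if start_index == -1:
--             # If we didn't find a start codon, there are no more start codons,
--             # and we are done.
--             break
--
--         stop_index = sequence.find("*", start_index)
--         if stop_index == -1:
--             # If a sequence ends without the stop codon, it's not a protein.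
--             return
--         else:
--             # Plus one so that the protein sequence includes the stop codon.
--             seq = str(sequence[start_index:stop_index + 1])
--
--         yield seq
--
--         index = stop_index + 1
-- ===== SOURCE B (Python) =====
-- def extract_proteins(sequence):
--     """Extract the protein sequences from a translated sequence.
--
--     Single left-to-right pass with a state machine: outside a protein we wait
--     for 'M'; inside, we accumulate characters until the stop codon '*'.
--     """
--     buf = None
--     for ch in sequence:
--         if buf is None:
--             if ch == 'M':
--                 buf = ['M']
--         else:
--             buf.append(ch)
--             if ch == '*':
--                 yield ''.join(buf)
--                 buf = None
-- ===== Notes on version B (the rewrite author's own statement) =====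
-- stated objective: alternative
-- what changed: Replaces A's index-driven loop of repeated str.find scans for the start/stop codons by a single left-to-right state-machine pass over the characters that opens a buffer at a start codon and emits it at the next stop codon.
import Mathlib
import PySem

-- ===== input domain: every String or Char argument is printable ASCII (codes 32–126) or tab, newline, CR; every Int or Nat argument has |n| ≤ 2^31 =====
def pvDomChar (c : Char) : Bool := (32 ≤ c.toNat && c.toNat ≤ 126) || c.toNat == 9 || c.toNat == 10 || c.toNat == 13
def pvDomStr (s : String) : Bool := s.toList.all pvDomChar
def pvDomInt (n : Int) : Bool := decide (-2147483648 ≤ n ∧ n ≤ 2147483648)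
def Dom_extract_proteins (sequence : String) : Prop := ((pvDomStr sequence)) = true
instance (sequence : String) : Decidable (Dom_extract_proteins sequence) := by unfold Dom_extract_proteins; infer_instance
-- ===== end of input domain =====

-- B replaces A's repeated str.find scans by a single left-to-right state-machine pass
-- (accumulate after an 'M', emit at '*'); same yielded values, proved equal below (alternative).


-- ===== PORT A =====
-- A's while loop, transliterated; fuel = len+1 only makes the recursion total
-- (index strictly increases each iteration, so the fuel is never exhausted).
def extract_proteins_loop (sequence : String) (fuel : Nat) (index : Int) : List String :=
  match fuel with
  | 0 => []
  | fuel + 1 =>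
    if index ≠ -1 ∧ index < PySem.Str.len sequence then
      let start_index := PySem.Str.findFrom sequence "M" index
      if start_index = -1 then []
      else
        let stop_index := PySem.Str.findFrom sequence "*" start_index
        if stop_index = -1 then []
        else
          PySem.Str.slice sequence (some start_index) (some (stop_index + 1)) ::
            extract_proteins_loop sequence fuel (stop_index + 1)
    else []

def extract_proteins (sequence : String) : List String :=
  extract_proteins_loop sequence (sequence.toList.length + 1) 0

-- ===== PORT B =====
-- state machine: buf = none (waiting for 'M') or some buffer (inside a protein)
def extract_proteins_alt_loop : List Char → Option (List Char) → List String
  | [], _ => []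
  | ch :: rest, none =>
      if ch = 'M' then extract_proteins_alt_loop rest (some ['M'])
      else extract_proteins_alt_loop rest none
  | ch :: rest, some buf =>
      if ch = '*' then String.ofList (buf ++ [ch]) :: extract_proteins_alt_loop rest none
      else extract_proteins_alt_loop rest (some (buf ++ [ch]))

def extract_proteins_alt (sequence : String) : List String :=
  extract_proteins_alt_loop sequence.toList none

-- ===== PRECONDITION & SPEC =====
def Spec_extract_proteins (sequence : String) (out : List String) : Prop := out = extract_proteins_alt sequence
instance (sequence : String) (out : List String) : Decidable (Spec_extract_proteins sequence out) := by unfold Spec_extract_proteins; infer_instance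

-- ===== CLAIM (what is proved, stated in full; the proofs are below) =====
def Claim_equal_extract_proteins : Prop := ∀ (sequence : String), Dom_extract_proteins sequence → Spec_extract_proteins sequence (extract_proteins sequence)

-- ===== LEMMAS AND PROOFS =====

-- single-character prefix/occurrence facts
lemma singleton_prefix_iff (c : Char) (l : List Char) : [c] <+: l ↔ l.head? = some c := by
  cases l with
  | nil => simp
  | cons x xs => simp [List.cons_prefix_cons, eq_comm]

lemma not_mem_take_of_min (c : Char) (l : List Char) (m : Nat)
    (h : ∀ i, i < m → ¬ [c] <+: l.drop i) : c ∉ l.take m := by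
  intro hmem
  obtain ⟨i, hi, hget⟩ := List.getElem_of_mem hmem
  have hlen : (l.take m).length = min m l.length := List.length_take
  apply h i (by omega)
  rw [singleton_prefix_iff, List.head?_drop]
  rw [List.getElem?_eq_getElem (by omega)]
  rw [← List.getElem_take (j := m) (h := hi), hget]

-- B's loop skips a 'M'-free prefix while waiting
lemma alt_loop_skip (pre rest : List Char) (h : 'M' ∉ pre) :
    extract_proteins_alt_loop (pre ++ rest) none = extract_proteins_alt_loop rest none := by
  induction pre with
  | nil => rfl
  | cons x xs ih =>
      simp only [List.mem_cons, not_or] at h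
      simp [extract_proteins_alt_loop, Ne.symm h.1, ih h.2]

-- B's loop yields nothing when no 'M' remains
lemma alt_loop_none_of_no_M (l : List Char) (h : 'M' ∉ l) :
    extract_proteins_alt_loop l none = [] := by
  have := alt_loop_skip l [] h
  simpa using this

-- B's loop yields nothing from an open buffer when no '*' remains
lemma alt_loop_some_of_no_star (l : List Char) (buf : List Char) (h : '*' ∉ l) :
    extract_proteins_alt_loop l (some buf) = [] := by
  induction l generalizing buf with
  | nil => rfl
  | cons x xs ih =>
      simp only [List.mem_cons, not_or] at h
      simp [extract_proteins_alt_loop, Ne.symm h.1, ih _ h.2]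

-- B's loop emits the buffer extended to the first '*'
lemma alt_loop_emit (u v : List Char) (buf : List Char) (h : '*' ∉ u) :
    extract_proteins_alt_loop (u ++ '*' :: v) (some buf) =
      String.ofList (buf ++ u ++ ['*']) :: extract_proteins_alt_loop v none := by
  induction u generalizing buf with
  | nil => simp [extract_proteins_alt_loop]
  | cons x xs ih =>
      simp only [List.mem_cons, not_or] at h
      simp only [List.cons_append, extract_proteins_alt_loop, if_neg (Ne.symm h.1)]
      rw [ih _ h.2]
      simp

-- main loop correspondence: A's loop at index k behaves as B's machine on the remaining suffix
lemma main_loop (s : String) (fuel k : Nat)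
    (hf : s.toList.length - k < fuel) (hk : k ≤ s.toList.length) :
    extract_proteins_loop s fuel (k : Int) =
      extract_proteins_alt_loop (s.toList.drop k) none := by
  induction fuel generalizing k with
  | zero => omega
  | succ fuel ih =>
    have hM1 : ("M" : String).toList = ['M'] := by decide
    have hS1 : ("*" : String).toList = ['*'] := by decide
    by_cases hkl : k < s.toList.length
    case neg =>
      have hke : k = s.toList.length := by omega
      rw [extract_proteins_loop, if_neg (by rw [PySem.Str.len_eq]; omega)]
      rw [hke, List.drop_length]
      rfl
    case pos =>
      set cs := s.toList with hcs
      set d := cs.drop k with hd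
      have hdlen : d.length = cs.length - k := by simp [hd]
      rw [extract_proteins_loop, if_pos (by rw [PySem.Str.len_eq, ← hcs]; constructor <;> omega)]
      rw [PySem.Str.findFrom_eq, hM1, ← hcs, PySem.Chars.findFrom_natCast cs ['M'] k hk, ← hd]
      by_cases hM : PySem.Chars.find d ['M'] = -1
      · rw [if_pos hM]
        have hnoM : 'M' ∉ d := by
          have := (PySem.Chars.find_eq_neg_one_iff d ['M']).mp hM
          rwa [List.singleton_infix_iff] at this
        rw [alt_loop_none_of_no_M d hnoM]
        simp
      · rw [if_neg hM]
        have hge : 0 ≤ PySem.Chars.find d ['M'] := by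
          have := PySem.Chars.neg_one_le_find d ['M']
          omega
        set m := (PySem.Chars.find d ['M']).toNat with hm
        have hmint : PySem.Chars.find d ['M'] = (m : Int) := by omega
        obtain ⟨hpre, hmin⟩ := PySem.Chars.find_spec hge
        rw [← hm] at hpre hmin
        clear_value m
        set e := d.drop m with he
        obtain ⟨e', he'⟩ : ∃ e', e = 'M' :: e' := by
          rw [singleton_prefix_iff] at hpre
          cases hee : e with
          | nil => rw [hee] at hpre; simp at hpre
          | cons a b => rw [hee] at hpre; simp at hpre; exact ⟨b, by rw [hpre]⟩
        have hmlt : m < d.length := by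
          by_contra hc
          have hnil : e = [] := by rw [he]; exact List.drop_eq_nil_of_le (by omega)
          rw [he'] at hnil; simp at hnil
        rw [hmint]
        have hkm : (k : Int) + (m : Int) = ((k + m : Nat) : Int) := by push_cast; ring
        rw [hkm, if_neg (by omega : ¬ (((k + m : Nat) : Int) = -1))]
        rw [PySem.Str.findFrom_eq, hS1, ← hcs, PySem.Chars.findFrom_natCast cs ['*'] (k + m) (by omega)]
        have hdropkm : cs.drop (k + m) = e := by
          rw [he, hd, List.drop_drop]
        rw [hdropkm]
        -- the alt loop skips the 'M'-free prefix of d and opens a buffer at the first 'M'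
        have hnoMtake : 'M' ∉ d.take m := not_mem_take_of_min 'M' d m hmin
        have hdsplit : d = d.take m ++ e := by rw [he]; simp
        have hrhs : extract_proteins_alt_loop d none =
            extract_proteins_alt_loop e' (some ['M']) := by
          conv_lhs => rw [hdsplit]
          rw [alt_loop_skip _ _ hnoMtake, he']
          simp [extract_proteins_alt_loop]
        by_cases hS : PySem.Chars.find e ['*'] = -1
        · rw [if_pos hS]
          have hnoStar : '*' ∉ e := by
            have := (PySem.Chars.find_eq_neg_one_iff e ['*']).mp hS
            rwa [List.singleton_infix_iff] at this
          have hns : '*' ∉ e' := by rw [he'] at hnoStar; simp at hnoStar; exact hnoStar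
          rw [hrhs, alt_loop_some_of_no_star e' ['M'] hns]
          simp
        · rw [if_neg hS]
          have hge2 : 0 ≤ PySem.Chars.find e ['*'] := by
            have := PySem.Chars.neg_one_le_find e ['*']
            omega
          set t := (PySem.Chars.find e ['*']).toNat with ht
          have htint : PySem.Chars.find e ['*'] = (t : Int) := by omega
          obtain ⟨hpre2, hmin2⟩ := PySem.Chars.find_spec hge2
          rw [← ht] at hpre2 hmin2
          clear_value t
          have htlt : t < e.length := by
            by_contra hc
            rw [List.drop_eq_nil_of_le (by omega)] at hpre2
            simp at hpre2
          have htpos : 0 < t := by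
            by_contra h0
            rw [Nat.eq_zero_of_not_pos h0, List.drop_zero, singleton_prefix_iff, he'] at hpre2
            simp at hpre2
          obtain ⟨v, hv⟩ : ∃ v, e.drop t = '*' :: v := by
            rw [singleton_prefix_iff] at hpre2
            cases hee : e.drop t with
            | nil => rw [hee] at hpre2; simp at hpre2
            | cons a b => rw [hee] at hpre2; simp at hpre2; exact ⟨b, by rw [hpre2]⟩
          have hnoStarTake : '*' ∉ e.take t := not_mem_take_of_min '*' e t hmin2
          have htake : e.take t = 'M' :: e'.take (t - 1) := by
            rw [he', show t = (t - 1) + 1 by omega, List.take_succ_cons]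
            simp
          set u := e'.take (t - 1) with hu
          have hnoStarU : '*' ∉ u := by
            rw [htake] at hnoStarTake; simp at hnoStarTake; exact hnoStarTake
          have hulen : u.length = t - 1 := by
            rw [hu, List.length_take]
            rw [he'] at htlt; simp at htlt; omega
          have hesplit : e = 'M' :: u ++ '*' :: v := by
            conv_lhs => rw [← List.take_append_drop t e]
            rw [htake, hv]
          have he'split : e' = u ++ '*' :: v := by
            have h3 := hesplit
            rw [he'] at h3
            simpa using h3
          rw [htint, if_neg (by omega : ¬ (((k + m : Nat) : Int) + (t : Int) = -1))]
          have hcast : ((k + m : Nat) : Int) + (t : Int) + 1 = ((k + m + t + 1 : Nat) : Int) := by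
            push_cast; ring
          rw [hcast]
          -- head: the slice A yields is the protein B emits
          have hMulen : ('M' :: u).length = t := by rw [List.length_cons, hulen]; omega
          have hslice : PySem.Str.slice s (some ((k + m : Nat) : Int))
              (some ((k + m + t + 1 : Nat) : Int)) = String.ofList (e.take (t + 1)) := by
            apply String.toList_inj.mp
            rw [PySem.Str.toList_slice, PySem.Chars.slice_eq_listSlice, ← hcs,
              PySem.List.slice_natCast, hdropkm, String.toList_ofList,
              show k + m + t + 1 - (k + m) = t + 1 by omega]
          have htake1 : e.take (t + 1) = 'M' :: u ++ ['*'] := by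
            conv_lhs => rw [hesplit]
            rw [show t + 1 = ('M' :: u).length + 1 by rw [hMulen], List.take_length_add_append]
            simp
          -- tail: A's next iteration = B on the rest, by the induction hypothesis
          have hdropt1 : cs.drop (k + m + t + 1) = v := by
            rw [show k + m + t + 1 = (k + m) + (t + 1) by omega, ← List.drop_drop, hdropkm, hesplit]
            rw [show t + 1 = ('M' :: u).length + 1 by rw [hMulen], List.drop_length_add_append]
            simp
          have helen : e.length = d.length - m := by rw [he]; simp
          rw [ih (k + m + t + 1) (by omega) (by omega), hdropt1]
          rw [hrhs, he'split, alt_loop_emit u v ['M'] hnoStarU, hslice, htake1]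
          simp

-- ===== VERDICT (by name: the statement is the Claim_ definition above) =====
theorem extract_proteins_spec : Claim_equal_extract_proteins := by
  intro s _
  unfold Spec_extract_proteins extract_proteins extract_proteins_alt
  have := main_loop s (s.toList.length + 1) 0 (by omega) (by omega)
  simpa using this
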